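-- pv_equiv track=rewrite | github.com/sam9s/media-assistant | app/sources/archive_org.py | _pick_format
-- ===== SOURCE A (Python) =====
-- def _pick_format(formats: list[str]) -> tuple[str, str]:
--     """Return (format_name, file_extension) preferring EPUB > PDF > CBZ > CBR."""
--     fmt_lower = [f.lower() for f in formats]
--     if "epub" in fmt_lower:
--         return "epub", "epub"
--     if "pdf" in fmt_lower:
--         return "pdf", "pdf"
--     if "cbz" in fmt_lower:
--         return "cbz", "cbz"
--     if "cbr" in fmt_lower:
--         return "cbr", "cbr"
--     return "", ""
-- ===== SOURCE B (Python) =====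
-- _RANKS = {"epub": 0, "pdf": 1, "cbz": 2, "cbr": 3}
-- _NAMES = ["epub", "pdf", "cbz", "cbr"]
--
-- def _pick_format(formats: list[str]) -> tuple[str, str]:
--     """Return (format_name, file_extension) preferring EPUB > PDF > CBZ > CBR."""
--     best = None
--     for f in formats:
--         rank = _RANKS.get(f.lower())
--         if rank is not None and (best is None or rank < best):
--             best = rank
--     if best is None:
--         return "", ""
--     name = _NAMES[best]
--     return name, name
-- ===== Notes on version B (the rewrite author's own statement) =====
-- stated objective: alternative
-- what changed: Replaces up to four separate membership scans over the lowered list with a single pass that keeps the minimum preference rank (via a rank dict) and maps it back to its name at the end.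
import Mathlib
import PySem

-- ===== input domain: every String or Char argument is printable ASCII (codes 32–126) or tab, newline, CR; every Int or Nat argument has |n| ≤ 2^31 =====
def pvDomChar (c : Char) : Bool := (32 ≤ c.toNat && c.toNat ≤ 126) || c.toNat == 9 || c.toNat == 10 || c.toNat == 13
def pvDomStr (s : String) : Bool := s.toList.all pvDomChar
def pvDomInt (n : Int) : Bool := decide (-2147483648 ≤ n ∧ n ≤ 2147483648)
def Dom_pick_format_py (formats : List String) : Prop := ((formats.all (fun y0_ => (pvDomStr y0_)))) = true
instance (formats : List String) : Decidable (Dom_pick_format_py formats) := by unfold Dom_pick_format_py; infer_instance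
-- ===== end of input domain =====

-- B replaces A's four membership scans over the lowered list by one pass keeping the
-- minimum preference rank (alternative decomposition, same observable behaviour).

-- ===== PORT A =====
def pick_format_py (formats : List String) : String × String :=
  let fmt_lower := formats.map PySem.Str.lower
  if "epub" ∈ fmt_lower then ("epub", "epub")
  else if "pdf" ∈ fmt_lower then ("pdf", "pdf")
  else if "cbz" ∈ fmt_lower then ("cbz", "cbz")
  else if "cbr" ∈ fmt_lower then ("cbr", "cbr")
  else ("", "")

-- ===== PORT B =====
def pvRanks : PySem.Dict String Int := PySem.Dict.ofList [("epub", 0), ("pdf", 1), ("cbz", 2), ("cbr", 3)]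
def pvNames : List String := ["epub", "pdf", "cbz", "cbr"]

-- one loop iteration of Source B: update the running best rank
def pvStep (best : Option Int) (f : String) : Option Int :=
  match PySem.Dict.get? pvRanks (PySem.Str.lower f) with
  | none => best
  | some r =>
    match best with
    | none => some r
    | some b => if r < b then some r else some b

def pick_format_py_alt (formats : List String) : String × String :=
  match formats.foldl pvStep none with
  | none => ("", "")
  | some b =>
    -- _NAMES[best]: best is always a rank 0..3 here, so the pyGet? is some and getD "" is exact
    let name := (PySem.List.pyGet? pvNames b).getD ""
    (name, name)

-- ===== PRECONDITION & SPEC =====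
def Spec_pick_format_py (formats : List String) (out : String × String) : Prop := out = pick_format_py_alt formats
instance (formats : List String) (out : String × String) : Decidable (Spec_pick_format_py formats out) := by unfold Spec_pick_format_py; infer_instance

-- ===== CLAIM (what is proved, stated in full; the proofs are below) =====
def Claim_equal_pick_format_py : Prop := ∀ (formats : List String), Dom_pick_format_py formats → Spec_pick_format_py formats (pick_format_py formats)

-- ===== LEMMAS AND PROOFS =====

-- the tier rank that A's chain of membership tests effectively selects
def pvR (l : List String) : Option Int :=
  let m := l.map PySem.Str.lower
  if "epub" ∈ m then some 0
  else if "pdf" ∈ m then some 1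
  else if "cbz" ∈ m then some 2
  else if "cbr" ∈ m then some 3
  else none

-- option-minimum underlying pvStep
def pvM (b r : Option Int) : Option Int :=
  match r with
  | none => b
  | some r =>
    match b with
    | none => some r
    | some b => if r < b then some r else some b

theorem pvRanks_get? (s : String) :
    PySem.Dict.get? pvRanks s =
      if s = "epub" then some 0 else if s = "pdf" then some 1
      else if s = "cbz" then some 2 else if s = "cbr" then some 3 else none := by
  have h : pvRanks = PySem.Dict.mk [("epub", 0), ("pdf", 1), ("cbz", 2), ("cbr", 3)] := by decide
  rw [h]
  simp only [PySem.Dict.get?_mk_cons]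
  have e : ∀ (a : String), (a == s) = (s == a) := fun a => by simp [BEq.comm]
  simp only [e, beq_iff_eq]
  split_ifs <;> rfl

theorem pvStep_eq (b : Option Int) (f : String) :
    pvStep b f = pvM b (PySem.Dict.get? pvRanks (PySem.Str.lower f)) := by
  cases h : PySem.Dict.get? pvRanks (PySem.Str.lower f) <;> simp [pvStep, pvM, h]

theorem pvM_assoc (a b c : Option Int) : pvM (pvM a b) c = pvM a (pvM b c) := by
  cases a <;> cases b <;> cases c <;>
    simp only [pvM] <;> split_ifs <;>
    simp only [pvM, Option.some.injEq] <;> (try split_ifs) <;>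
    first | rfl | omega

theorem pvM_step_R (f : String) (l : List String) :
    pvM (PySem.Dict.get? pvRanks (PySem.Str.lower f)) (pvR l) = pvR (f :: l) := by
  rw [pvRanks_get?]
  unfold pvR
  simp only [List.map_cons, List.mem_cons]
  generalize PySem.Str.lower f = s
  by_cases h0 : s = "epub"
  · subst h0; simp; split_ifs <;> decide
  by_cases h1 : s = "pdf"
  · subst h1; simp [h0]; split_ifs <;> decide
  by_cases h2 : s = "cbz"
  · subst h2; simp [h0, h1]; split_ifs <;> decide
  by_cases h3 : s = "cbr"
  · subst h3; simp [h0, h1, h2]; split_ifs <;> decide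
  · simp [h0, h1, h2, h3,
      show ¬("epub" = s) from fun h => h0 h.symm,
      show ¬("pdf" = s) from fun h => h1 h.symm,
      show ¬("cbz" = s) from fun h => h2 h.symm,
      show ¬("cbr" = s) from fun h => h3 h.symm]
    split_ifs <;> decide

theorem foldl_pvStep (l : List String) (b : Option Int) :
    l.foldl pvStep b = pvM b (pvR l) := by
  induction l generalizing b with
  | nil => simp [pvR, pvM]
  | cons f l ih =>
    simp only [List.foldl_cons, ih, pvStep_eq]
    rw [pvM_assoc, pvM_step_R]

theorem pvM_none (r : Option Int) : pvM none r = r := by cases r <;> rfl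

-- ===== VERDICT (by name: the statement is the Claim_ definition above) =====
theorem pick_format_py_spec : Claim_equal_pick_format_py := by
  intro formats _
  unfold Spec_pick_format_py pick_format_py pick_format_py_alt
  rw [foldl_pvStep, pvM_none]
  unfold pvR
  by_cases h0 : "epub" ∈ formats.map PySem.Str.lower
  · simp [h0, pvNames, PySem.List.pyGet?, PySem.List.pyIdx?]
  by_cases h1 : "pdf" ∈ formats.map PySem.Str.lower
  · simp [h0, h1, pvNames, PySem.List.pyGet?, PySem.List.pyIdx?]
  by_cases h2 : "cbz" ∈ formats.map PySem.Str.lower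
  · simp [h0, h1, h2, pvNames, PySem.List.pyGet?, PySem.List.pyIdx?]
  by_cases h3 : "cbr" ∈ formats.map PySem.Str.lower
  · simp [h0, h1, h2, h3, pvNames, PySem.List.pyGet?, PySem.List.pyIdx?]
  · simp [h0, h1, h2, h3]
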